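-- pv_equiv track=rewrite | github.com/Handonggon/coding_test | programmers/1level/카카오.py | solution
-- ===== SOURCE A (Python) =====
-- def solution(s,c):
--     dic={'R':0,"T":0,"C":0,"F":0,"J":0,"M":0,"A":0,"N":0}
--
--     for i in range(len(s)):
--         if c[i] == 5: dic[s[i][1]] += 1
--         elif c[i] == 6: dic[s[i][1]] += 2
--         elif c[i] == 7: dic[s[i][1]] += 3
--         elif c[i] == 3: dic[s[i][0]] += 1
--         elif c[i] == 2: dic[s[i][0]] += 2
--         elif c[i] == 1: dic[s[i][0]] += 3
--     ans = ''
--     if dic.get("R") < dic.get("T"):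
--         ans += "T"
--     else: ans += "R"
--     if dic.get("C") < dic.get("F"):
--         ans += "F"
--     else: ans += "C"
--     if dic.get("J") < dic.get("M"):
--         ans += "M"
--     else: ans += "J"
--     if dic.get("A") < dic.get("N"):
--         ans += "N"
--     else: ans += "A"
--
--     return ans
-- ===== SOURCE B (Python) =====
-- def solution(s, c):
--     ans = ''
--     for lo, hi in ('RT', 'CF', 'JM', 'AN'):
--         net = 0
--         for word, choice in zip(s, c):
--             if 1 <= choice <= 7 and choice != 4:
--                 letter = word[1] if choice > 4 else word[0]
--                 w = abs(choice - 4)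
--                 if letter == hi:
--                     net += w
--                 elif letter == lo:
--                     net -= w
--         ans += hi if net > 0 else lo
--     return ans
-- ===== Notes on version B (the rewrite author's own statement) =====
-- stated objective: alternative
-- what changed: Eliminates the 8-counter dictionary entirely: B makes one pass per axis over zip(s,c) maintaining a single signed differential score (positive contributions toward the axis's second letter, negative toward the first) and picks the second letter iff the net is strictly positive, instead of A's single-pass 6-way branch tally into a dict followed by four hardcoded comparisons.
import Mathlib
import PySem

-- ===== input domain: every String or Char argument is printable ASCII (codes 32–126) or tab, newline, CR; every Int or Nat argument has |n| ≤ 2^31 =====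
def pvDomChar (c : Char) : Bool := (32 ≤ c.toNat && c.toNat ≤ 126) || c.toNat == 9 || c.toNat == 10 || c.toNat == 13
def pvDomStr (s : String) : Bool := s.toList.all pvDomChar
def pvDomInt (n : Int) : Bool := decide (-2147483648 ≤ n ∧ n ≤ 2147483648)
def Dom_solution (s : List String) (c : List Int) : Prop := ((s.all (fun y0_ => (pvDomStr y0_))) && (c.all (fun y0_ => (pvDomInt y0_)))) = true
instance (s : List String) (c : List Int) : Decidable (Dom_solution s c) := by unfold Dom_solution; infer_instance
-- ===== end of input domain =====

-- B drops A's 8-counter dict: per axis it makes a pass over zip(s,c) keeping one signed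
-- differential score and picks the second letter iff the net is strictly positive (objective: alternative).

-- ===== PORT A =====
-- shared helper: w[i] as a total function (default never reached under Pre_)
def chrAt (w : String) (i : Int) : Char := (PySem.Str.pyGet? w i).getD ' '

-- loop body of A's for-loop, as a helper
def aStep (d : PySem.Dict Char Int) (wi : String) (ci : Int) : PySem.Dict Char Int :=
  if ci == 5 then d.modify (chrAt wi 1) 0 (· + 1)
  else if ci == 6 then d.modify (chrAt wi 1) 0 (· + 2)
  else if ci == 7 then d.modify (chrAt wi 1) 0 (· + 3)
  else if ci == 3 then d.modify (chrAt wi 0) 0 (· + 1)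
  else if ci == 2 then d.modify (chrAt wi 0) 0 (· + 2)
  else if ci == 1 then d.modify (chrAt wi 0) 0 (· + 3)
  else d

def solution (s : List String) (c : List Int) : String :=
  let dic : PySem.Dict Char Int :=
    ((((((((PySem.Dict.empty.insert 'R' 0).insert 'T' 0).insert 'C' 0).insert 'F' 0).insert 'J' 0).insert 'M' 0).insert 'A' 0).insert 'N' 0)
  let dic := (PySem.List.pyRange 0 (PySem.List.len s) 1).foldl
    (fun d i => aStep d (PySem.List.pyGetD s i "") (PySem.List.pyGetD c i 0)) dic
  let ans : List Char := []
  let ans := ans ++ [if dic.getD 'R' 0 < dic.getD 'T' 0 then 'T' else 'R']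
  let ans := ans ++ [if dic.getD 'C' 0 < dic.getD 'F' 0 then 'F' else 'C']
  let ans := ans ++ [if dic.getD 'J' 0 < dic.getD 'M' 0 then 'M' else 'J']
  let ans := ans ++ [if dic.getD 'A' 0 < dic.getD 'N' 0 then 'N' else 'A']
  String.ofList ans

-- ===== PORT B =====
-- inner-loop body of B: signed differential score for the axis (lo, hi)
def bNet (lo hi : Char) (n : Int) (p : String × Int) : Int :=
  if 1 ≤ p.2 ∧ p.2 ≤ 7 ∧ p.2 ≠ 4 then
    let letter := if 4 < p.2 then chrAt p.1 1 else chrAt p.1 0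
    let w := |p.2 - 4|
    if letter = hi then n + w else if letter = lo then n - w else n
  else n

def bAxes : List (Char × Char) := [('R', 'T'), ('C', 'F'), ('J', 'M'), ('A', 'N')]

def solution_alt (s : List String) (c : List Int) : String :=
  String.ofList (bAxes.foldl
    (fun ans p =>
      let net := (s.zip c).foldl (bNet p.1 p.2) 0
      ans ++ [if 0 < net then p.2 else p.1]) [])

-- ===== PRECONDITION & SPEC =====
def pvLetters : List Char := ['R', 'T', 'C', 'F', 'J', 'M', 'A', 'N']

-- the per-question shape A needs to return: the letter it indexes exists and is one of the 8 keys
def okPair (w : String) (ci : Int) : Bool :=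
  (if 5 ≤ ci ∧ ci ≤ 7 then decide (1 < w.toList.length) && decide (chrAt w 1 ∈ pvLetters) else true) &&
  (if 1 ≤ ci ∧ ci ≤ 3 then decide (0 < w.toList.length) && decide (chrAt w 0 ∈ pvLetters) else true)

-- Pre_ excludes exactly the inputs where A raises: len(c) < len(s) (IndexError on c[i]), a survey string too
-- short for the indexed side (IndexError), or an indexed letter outside the 8 dict keys (KeyError).
def Pre_solution (s : List String) (c : List Int) : Prop :=
  s.length ≤ c.length ∧ ∀ p ∈ s.zip c, okPair p.1 p.2 = true
instance (s : List String) (c : List Int) : Decidable (Pre_solution s c) := by unfold Pre_solution; infer_instance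

def pvWitness_solution : List String × List Int := (["RT", "CF"], [5, 2])

def Spec_solution (s : List String) (c : List Int) (out : String) : Prop := out = solution_alt s c
instance (s : List String) (c : List Int) (out : String) : Decidable (Spec_solution s c out) := by unfold Spec_solution; infer_instance

-- ===== CLAIM (what is proved, stated in full; the proofs are below) =====
def Claim_equal_solution : Prop := ∀ (s : List String) (c : List Int), Dom_solution s c → Pre_solution s c → Spec_solution s c (solution s c)

-- ===== LEMMAS AND PROOFS =====

-- difference of a single modify, split by which letter was bumped
theorem modify_diff (d : PySem.Dict Char Int) (l lo hi : Char) (k : Int) (hne : lo ≠ hi) :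
    (d.modify l 0 (· + k)).getD hi 0 - (d.modify l 0 (· + k)).getD lo 0
      = d.getD hi 0 - d.getD lo 0 + (if l = hi then k else if l = lo then -k else 0) := by
  rw [PySem.Dict.getD_modify, PySem.Dict.getD_modify]
  by_cases h1 : hi = l
  · subst h1
    rw [if_pos rfl, if_neg hne, if_pos rfl]; ring
  · by_cases h2 : lo = l
    · subst h2
      rw [if_neg h1, if_pos rfl, if_neg hne, if_pos rfl]; ring
    · rw [if_neg h1, if_neg h2, if_neg (fun h => h1 h.symm), if_neg (fun h => h2 h.symm)]; ring

-- one B step tracks the hi-minus-lo difference of one A step (no side condition needed: both use chrAt)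
theorem net_step (lo hi : Char) (hne : lo ≠ hi) (d : PySem.Dict Char Int) (n : Int)
    (w : String) (ci : Int) (h : n = d.getD hi 0 - d.getD lo 0) :
    bNet lo hi n (w, ci) = (aStep d w ci).getD hi 0 - (aStep d w ci).getD lo 0 := by
  by_cases h5 : ci = 5
  · subst h5; simp only [aStep, bNet]; norm_num
    rw [modify_diff d (chrAt w 1) lo hi 1 hne]
    split_ifs <;> omega
  by_cases h6 : ci = 6
  · subst h6; simp only [aStep, bNet]; norm_num
    rw [modify_diff d (chrAt w 1) lo hi 2 hne]
    split_ifs <;> omega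
  by_cases h7 : ci = 7
  · subst h7; simp only [aStep, bNet]; norm_num
    rw [modify_diff d (chrAt w 1) lo hi 3 hne]
    split_ifs <;> omega
  by_cases h3 : ci = 3
  · subst h3; simp only [aStep, bNet]; norm_num
    rw [modify_diff d (chrAt w 0) lo hi 1 hne]
    split_ifs <;> omega
  by_cases h2 : ci = 2
  · subst h2; simp only [aStep, bNet]; norm_num
    rw [modify_diff d (chrAt w 0) lo hi 2 hne]
    split_ifs <;> omega
  by_cases h1 : ci = 1
  · subst h1; simp only [aStep, bNet]; norm_num
    rw [modify_diff d (chrAt w 0) lo hi 3 hne]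
    split_ifs <;> omega
  · simp only [aStep, bNet]
    have hg : ¬ (1 ≤ ci ∧ ci ≤ 7 ∧ ci ≠ 4) := by omega
    simp only [beq_iff_eq, if_neg h5, if_neg h6, if_neg h7, if_neg h3, if_neg h2, if_neg h1, if_neg hg]
    exact h

theorem fold_net (lo hi : Char) (hne : lo ≠ hi) (zs : List (String × Int))
    (d : PySem.Dict Char Int) (n : Int) (h : n = d.getD hi 0 - d.getD lo 0) :
    zs.foldl (bNet lo hi) n
      = (zs.foldl (fun d p => aStep d p.1 p.2) d).getD hi 0
        - (zs.foldl (fun d p => aStep d p.1 p.2) d).getD lo 0 := by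
  induction zs generalizing d n with
  | nil => exact h
  | cons p zs ih =>
      exact ih (aStep d p.1 p.2) _ (net_step lo hi hne d n p.1 p.2 h)

theorem loop_zip (s : List String) (c : List Int) (h : s.length ≤ c.length) (d0 : PySem.Dict Char Int) :
    (PySem.List.pyRange 0 (PySem.List.len s) 1).foldl
      (fun d i => aStep d (PySem.List.pyGetD s i "") (PySem.List.pyGetD c i 0)) d0
    = (s.zip c).foldl (fun d p => aStep d p.1 p.2) d0 := by
  have hlen : (s.zip c).length = s.length := by
    rw [List.length_zip]; omega
  have hr : PySem.List.len s = PySem.List.len (s.zip c) := by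
    simp [PySem.List.len_eq, hlen]
  rw [hr]
  have hcongr : ∀ (acc : PySem.Dict Char Int), ∀ j ∈ PySem.List.pyRange 0 (PySem.List.len (s.zip c)) 1,
      aStep acc (PySem.List.pyGetD s j "") (PySem.List.pyGetD c j 0)
      = (fun d (p : String × Int) => aStep d p.1 p.2) acc (PySem.List.pyGetD (s.zip c) j ("", 0)) := by
    intro acc j hj
    obtain ⟨hj0, hj1⟩ := PySem.List.mem_pyRange_one.mp hj
    rw [PySem.List.len_eq] at hj1
    have hjs : j < (s.length : Int) := by rw [hlen] at hj1; exact_mod_cast hj1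
    have hjc : j < (c.length : Int) := by omega
    have hjz : j < ((s.zip c).length : Int) := by exact_mod_cast hj1
    rw [PySem.List.pyGetD_eq_getElem s "" hj0 hjs, PySem.List.pyGetD_eq_getElem c 0 hj0 hjc,
        PySem.List.pyGetD_eq_getElem (s.zip c) ("", 0) hj0 hjz]
    simp [List.getElem_zip]
  rw [PySem.List.foldl_congr_mem _ _ _ d0 hcongr]
  exact PySem.List.foldl_pyRange_zero_pyGetD (s.zip c) ("", 0) (fun d p => aStep d p.1 p.2) d0

-- ===== VERDICT (by name: the statement is the Claim_ definition above) =====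
set_option maxRecDepth 8192 in
theorem solution_spec : Claim_equal_solution := by
  intro s c _ hpre
  obtain ⟨hlen, _⟩ := hpre
  unfold Spec_solution solution solution_alt
  simp only [bAxes, List.foldl, List.nil_append]
  rw [loop_zip s c hlen]
  rw [fold_net 'R' 'T' (by decide) (s.zip c) ((((((((PySem.Dict.empty.insert 'R' 0).insert 'T' 0).insert 'C' 0).insert 'F' 0).insert 'J' 0).insert 'M' 0).insert 'A' 0).insert 'N' 0) 0 (by rfl)]
  rw [fold_net 'C' 'F' (by decide) (s.zip c) ((((((((PySem.Dict.empty.insert 'R' 0).insert 'T' 0).insert 'C' 0).insert 'F' 0).insert 'J' 0).insert 'M' 0).insert 'A' 0).insert 'N' 0) 0 (by rfl)]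
  rw [fold_net 'J' 'M' (by decide) (s.zip c) ((((((((PySem.Dict.empty.insert 'R' 0).insert 'T' 0).insert 'C' 0).insert 'F' 0).insert 'J' 0).insert 'M' 0).insert 'A' 0).insert 'N' 0) 0 (by rfl)]
  rw [fold_net 'A' 'N' (by decide) (s.zip c) ((((((((PySem.Dict.empty.insert 'R' 0).insert 'T' 0).insert 'C' 0).insert 'F' 0).insert 'J' 0).insert 'M' 0).insert 'A' 0).insert 'N' 0) 0 (by rfl)]
  simp only [Int.sub_pos]
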